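-- pv_equiv track=rewrite | github.com/clindoso/clindoso-gpt-translation-test | gpt-project/scripts/translate_w_fm.py | extract_translated_text
-- ===== SOURCE A (Python) =====
-- def extract_translated_text(translated_segments):
--     """
--     Extracts the target text the translated segments list
--     Returns text in one string
--     """
--     # Initialize marker count
--     marker_count = 0
--     # Initialize list to store extracted segments
--     extracted_segments = []
--     for _, target_segment in translated_segments:
--         # Check for frontmatter delimiter
--         if target_segment == "---":
--             marker_count += 1
--             # Skip segments until the second frontmatter delimiter is found
--             if marker_count < 2:
--                 continue
--
--         # Avoid reproducing frontmatter delimiter twice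
--         if target_segment == "---" and marker_count == 2:
--             continue
--         # Append segments after second '---'
--         elif marker_count == 2:
--             extracted_segments.append(target_segment)
--
--     # Join text list in one string
--     joint_translated_text = "\n".join(extracted_segments)
--
--     return joint_translated_text
-- ===== SOURCE B (Python) =====
-- def extract_translated_text(translated_segments):
--     """
--     Extracts the target text the translated segments list
--     Returns text in one string
--     """
--     targets = [t for _, t in translated_segments]
--     if "---" not in targets:
--         return ""
--     after_first = targets[targets.index("---") + 1:]
--     if "---" not in after_first:
--         return ""
--     body = after_first[after_first.index("---") + 1:]
--     if "---" in body:
--         body = body[:body.index("---")]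
--     return "\n".join(body)
-- ===== Notes on version B (the rewrite author's own statement) =====
-- stated objective: simpler
-- what changed: Replaces the running marker-count state machine over all segments with direct index()/slice operations: locate the first two '---' delimiters, slice the text after them, and truncate at the next '---' if present.
import Mathlib
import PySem

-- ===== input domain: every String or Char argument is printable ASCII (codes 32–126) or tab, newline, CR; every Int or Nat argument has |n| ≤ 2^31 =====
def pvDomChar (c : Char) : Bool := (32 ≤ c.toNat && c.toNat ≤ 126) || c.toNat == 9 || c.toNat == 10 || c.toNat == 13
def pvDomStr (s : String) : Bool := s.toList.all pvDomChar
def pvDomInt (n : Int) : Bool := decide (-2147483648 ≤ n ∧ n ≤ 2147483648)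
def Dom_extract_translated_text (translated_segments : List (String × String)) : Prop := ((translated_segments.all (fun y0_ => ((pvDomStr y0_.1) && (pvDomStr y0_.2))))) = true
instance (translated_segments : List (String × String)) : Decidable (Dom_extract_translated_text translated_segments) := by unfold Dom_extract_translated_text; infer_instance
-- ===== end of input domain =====

-- B replaces A's marker-count state machine by index()/slice over the '---' delimiters (simpler decomposition, same cost).

-- ===== PORT A =====
-- the for-loop of A: state = (marker_count, extracted_segments); branches in Python's order
def pvLoopA : List (String × String) → Nat → List String → List String
  | [], _, acc => acc
  | (_, t) :: rest, c, acc =>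
    let c := if t == "---" then c + 1 else c
    if t == "---" && decide (c < 2) then pvLoopA rest c acc          -- continue (before 2nd '---')
    else if t == "---" && c == 2 then pvLoopA rest c acc             -- skip the 2nd '---' itself
    else if c == 2 then pvLoopA rest c (acc ++ [t])                  -- append
    else pvLoopA rest c acc

def extract_translated_text (translated_segments : List (String × String)) : String :=
  PySem.Str.join "\n" (pvLoopA translated_segments 0 [])

-- ===== PORT B =====
def extract_translated_text_alt (translated_segments : List (String × String)) : String :=
  let targets := translated_segments.map (fun p => p.2)
  if targets.contains "---" then
    let after_first := PySem.List.slice targets (some ((((PySem.List.index? targets "---").getD 0 + 1 : Nat)) : Int)) none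
    if after_first.contains "---" then
      let body := PySem.List.slice after_first (some ((((PySem.List.index? after_first "---").getD 0 + 1 : Nat)) : Int)) none
      let body := if body.contains "---" then PySem.List.slice body none (some ((PySem.List.index? body "---").getD 0 : Nat)) else body
      PySem.Str.join "\n" body
    else ""
  else ""

-- ===== PRECONDITION & SPEC =====
def Spec_extract_translated_text (translated_segments : List (String × String)) (out : String) : Prop := out = extract_translated_text_alt translated_segments
instance (translated_segments : List (String × String)) (out : String) : Decidable (Spec_extract_translated_text translated_segments out) := by unfold Spec_extract_translated_text; infer_instance

-- ===== CLAIM (what is proved, stated in full; the proofs are below) =====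
def Claim_equal_extract_translated_text : Prop := ∀ (translated_segments : List (String × String)), Dom_extract_translated_text translated_segments → Spec_extract_translated_text translated_segments (extract_translated_text translated_segments)

-- ===== LEMMAS AND PROOFS =====

-- selection function: the segments A keeps, as a function of the marker count seen so far
def pvSel : Nat → List String → List String
  | _, [] => []
  | c, t :: ts => if t == "---" then pvSel (c + 1) ts else if c == 2 then t :: pvSel c ts else pvSel c ts

-- the predicate 'not a delimiter'
def pvP (t : String) : Bool := !(t == "---")

theorem pvLoopA_eq_sel (segs : List (String × String)) (c : Nat) (acc : List String) :
    pvLoopA segs c acc = acc ++ pvSel c (segs.map (fun p => p.2)) := by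
  induction segs generalizing c acc with
  | nil => simp [pvLoopA, pvSel]
  | cons st rest ih =>
    obtain ⟨s, t⟩ := st
    by_cases ht : t = "---"
    · subst ht
      simp only [pvLoopA, pvSel, List.map_cons, beq_self_eq_true, if_true]
      by_cases hc : c + 1 < 2
      · simp [hc, ih]
      · by_cases hc2 : c + 1 = 2 <;> simp [hc, hc2, ih]
    · simp only [pvLoopA, pvSel, List.map_cons, beq_iff_eq, ht, if_false]
      have hbt : (t == "---") = false := by simp [ht]
      by_cases hc2 : c = 2 <;>
        simp [hbt, hc2, ih, List.append_assoc]

theorem pvSel_ge3 (ts : List String) (c : Nat) (h : 3 ≤ c) : pvSel c ts = [] := by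
  induction ts generalizing c with
  | nil => simp [pvSel]
  | cons t ts ih =>
    have hc2 : c ≠ 2 := by omega
    by_cases ht : t = "---"
    · simp [pvSel, ht, ih (c + 1) (by omega)]
    · simp [pvSel, ht, hc2, ih c h]

theorem pvSel_two (ts : List String) : pvSel 2 ts = ts.takeWhile pvP := by
  induction ts with
  | nil => simp [pvSel]
  | cons t ts ih =>
    by_cases ht : t = "---"
    · simp [pvSel, ht, pvSel_ge3 ts 3 le_rfl, pvP]
    · simp [pvSel, ht, ih, pvP]

theorem pvSel_one (ts : List String) : pvSel 1 ts = pvSel 2 (ts.dropWhile pvP).tail := by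
  induction ts with
  | nil => simp [pvSel]
  | cons t ts ih =>
    by_cases ht : t = "---"
    · simp [pvSel, ht, pvP]
    · simp [pvSel, ht, ih, pvP]

theorem pvSel_zero (ts : List String) : pvSel 0 ts = pvSel 1 (ts.dropWhile pvP).tail := by
  induction ts with
  | nil => simp [pvSel]
  | cons t ts ih =>
    by_cases ht : t = "---"
    · simp [pvSel, ht, pvP]
    · simp [pvSel, ht, ih, pvP]

-- index? of '---' is the length of the delimiter-free prefix
theorem pvIndex_eq (ts : List String) (h : "---" ∈ ts) :
    PySem.List.index? ts "---" = some (ts.takeWhile pvP).length := by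
  induction ts with
  | nil => simp at h
  | cons t ts ih =>
    by_cases ht : t = "---"
    · subst ht
      rw [PySem.List.index?_cons_self]
      simp [pvP]
    · have hm : "---" ∈ ts := by simpa [ht, eq_comm] using h
      rw [PySem.List.index?_cons_of_ne ts ht, ih hm]
      simp [pvP, ht]

-- dropWhile as a drop
theorem pvDropWhile_eq (ts : List String) : List.dropWhile pvP ts = ts.drop (ts.takeWhile pvP).length := by
  induction ts with
  | nil => simp
  | cons t ts ih => by_cases h : pvP t <;> simp [h, ih]

-- drop past the first delimiter = tail of dropWhile
theorem pvDrop_eq (ts : List String) :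
    ts.drop ((ts.takeWhile pvP).length + 1) = (ts.dropWhile pvP).tail := by
  rw [← List.tail_drop, ← pvDropWhile_eq]

theorem pvTake_eq (ts : List String) :
    ts.take (ts.takeWhile pvP).length = ts.takeWhile pvP := by
  induction ts with
  | nil => simp
  | cons t ts ih => by_cases h : pvP t <;> simp [h, ih]

theorem pvNotMem_tail (ts : List String) (h : "---" ∉ ts) : (ts.dropWhile pvP).tail = [] := by
  have : ts.dropWhile pvP = [] := by
    rw [List.dropWhile_eq_nil_iff]
    intro x hx
    simp [pvP]
    rintro rfl; exact h hx
  simp [this]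

-- ===== VERDICT (by name: the statement is the Claim_ definition above) =====
theorem extract_translated_text_spec : Claim_equal_extract_translated_text := by
  intro segs _
  unfold Spec_extract_translated_text extract_translated_text extract_translated_text_alt
  rw [pvLoopA_eq_sel, List.nil_append, pvSel_zero, pvSel_one, pvSel_two]
  set ts := segs.map (fun p => p.2) with hts
  by_cases h1 : "---" ∈ ts
  · rw [if_pos (by simpa using h1)]
    rw [pvIndex_eq ts h1]
    simp only [Option.getD_some]
    rw [PySem.List.slice_from_natCast, pvDrop_eq]
    set aft := (ts.dropWhile pvP).tail with haft
    by_cases h2 : "---" ∈ aft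
    · rw [if_pos (by simpa using h2)]
      rw [pvIndex_eq aft h2]
      simp only [Option.getD_some]
      rw [PySem.List.slice_from_natCast, pvDrop_eq]
      set body := (aft.dropWhile pvP).tail with hbody
      by_cases h3 : "---" ∈ body
      · rw [if_pos (by simpa using h3)]
        rw [pvIndex_eq body h3]
        simp only [Option.getD_some]
        rw [PySem.List.slice_to_natCast, pvTake_eq body]
      · rw [if_neg (by simpa using h3)]
        rw [List.takeWhile_eq_self_iff.mpr]
        intro x hx
        simp [pvP]; rintro rfl; exact h3 hx
    · rw [if_neg (by simpa using h2)]
      rw [pvNotMem_tail aft h2]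
      simp [PySem.Str.join]
  · rw [if_neg (by simpa using h1)]
    rw [pvNotMem_tail ts h1, pvNotMem_tail [] (by simp)]
    simp [PySem.Str.join]
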